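-- pv_equiv track=rewrite | github.com/ww9592447/115Client | API/login.py | get_pwd_level
-- ===== SOURCE A (Python) =====
-- def get_pwd_level(password: str) -> int:
--     def t(e) -> int:
--         _t = 0
--         for i in range(4):
--             if e & 1:
--                 _t += 1
--             e >>= 1
--         return _t
--
--     def o(e) -> int:
--         return 1 if 48 <= e <= 57 else 4 if 65 <= e <= 90 else 8
--
--     if len(password) <= 5:
--         return 0
--     level = 0
--     for char in password:
--         level |= o(ord(char))
--     return t(level) + (1 if len(password) > 8 else 0)
-- ===== SOURCE B (Python) =====
-- def get_pwd_level(password: str) -> int: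
--     if len(password) <= 5:
--         return 0
--     has_digit = any(48 <= ord(c) <= 57 for c in password)
--     has_upper = any(65 <= ord(c) <= 90 for c in password)
--     has_other = any(ord(c) < 48 or 57 < ord(c) < 65 or ord(c) > 90 for c in password)
--     return has_digit + has_upper + has_other + (1 if len(password) > 8 else 0)
-- ===== Notes on version B (the rewrite author's own statement) =====
-- stated objective: simpler
-- what changed: Replaces the bitmask-OR accumulation plus hand-rolled 4-bit popcount with three independent category-presence scans summed directly.
import Mathlib
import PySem

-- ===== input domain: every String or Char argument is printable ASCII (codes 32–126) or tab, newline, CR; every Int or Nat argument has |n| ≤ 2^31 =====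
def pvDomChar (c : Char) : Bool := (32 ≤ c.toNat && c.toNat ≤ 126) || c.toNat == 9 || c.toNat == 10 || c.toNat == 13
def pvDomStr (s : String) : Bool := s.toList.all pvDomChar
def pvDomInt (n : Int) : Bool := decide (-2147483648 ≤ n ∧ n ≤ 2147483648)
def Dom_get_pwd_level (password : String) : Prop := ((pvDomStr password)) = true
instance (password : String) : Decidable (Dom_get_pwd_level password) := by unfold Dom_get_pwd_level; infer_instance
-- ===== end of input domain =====

-- B replaces A's bitmask OR-accumulation + hand-rolled popcount with three category-presence scans (simpler decomposition); return values agree on all inputs.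
-- ===== PORT A =====
-- inner helper t: 4-iteration popcount of the low bits
def pvA_t (e0 : Nat) : Int :=
  ((PySem.List.pyRange 0 4 1).foldl (fun (st : Nat × Int) _ =>
    (st.1 >>> 1, if st.1 &&& 1 = 1 then st.2 + 1 else st.2)) (e0, 0)).2

-- inner helper o: category bit of a char code
def pvA_o (e : Nat) : Nat :=
  if 48 ≤ e ∧ e ≤ 57 then 1 else if 65 ≤ e ∧ e ≤ 90 then 4 else 8

def get_pwd_level (password : String) : Int :=
  if PySem.Str.len password ≤ 5 then 0
  else
    let level := password.toList.foldl (fun l c => l ||| pvA_o c.toNat) 0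
    pvA_t level + (if PySem.Str.len password > 8 then 1 else 0)

-- ===== PORT B =====
def pvB_digit (c : Char) : Bool := decide (48 ≤ c.toNat ∧ c.toNat ≤ 57)
def pvB_upper (c : Char) : Bool := decide (65 ≤ c.toNat ∧ c.toNat ≤ 90)
def pvB_other (c : Char) : Bool :=
  decide (c.toNat < 48 ∨ (57 < c.toNat ∧ c.toNat < 65) ∨ 90 < c.toNat)

def get_pwd_level_alt (password : String) : Int :=
  if PySem.Str.len password ≤ 5 then 0
  else
    let cs := password.toList
    let has_digit := cs.any pvB_digit
    let has_upper := cs.any pvB_upper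
    let has_other := cs.any pvB_other
    (if has_digit then 1 else 0) + (if has_upper then 1 else 0) +
      (if has_other then 1 else 0) + (if PySem.Str.len password > 8 then 1 else 0)

-- ===== PRECONDITION & SPEC =====
def Spec_get_pwd_level (password : String) (out : Int) : Prop := out = get_pwd_level_alt password
instance (password : String) (out : Int) : Decidable (Spec_get_pwd_level password out) := by unfold Spec_get_pwd_level; infer_instance

-- ===== CLAIM (what is proved, stated in full; the proofs are below) =====
def Claim_equal_get_pwd_level : Prop := ∀ (password : String), Dom_get_pwd_level password → Spec_get_pwd_level password (get_pwd_level password)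

-- ===== LEMMAS AND PROOFS =====

def pvMask (cs : List Char) : Nat :=
  (if cs.any pvB_digit then 1 else 0) ||| (if cs.any pvB_upper then 4 else 0) |||
    (if cs.any pvB_other then 8 else 0)

theorem pvA_o_mask (c : Char) (cs : List Char) :
    pvA_o c.toNat ||| pvMask cs = pvMask (c :: cs) := by
  unfold pvMask
  rw [List.any_cons, List.any_cons, List.any_cons]
  by_cases h1 : 48 ≤ c.toNat ∧ c.toNat ≤ 57
  · have hd : pvB_digit c = true := by simp [pvB_digit]; omega
    have hu : pvB_upper c = false := by simp [pvB_upper]; omega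
    have ho : pvB_other c = false := by simp [pvB_other]; omega
    rw [hd, hu, ho, show pvA_o c.toNat = 1 from by simp [pvA_o, h1]]
    cases cs.any pvB_digit <;> cases cs.any pvB_upper <;> cases cs.any pvB_other <;> decide
  · by_cases h2 : 65 ≤ c.toNat ∧ c.toNat ≤ 90
    · have hd : pvB_digit c = false := by simp [pvB_digit]; omega
      have hu : pvB_upper c = true := by simp [pvB_upper]; omega
      have ho : pvB_other c = false := by simp [pvB_other]; omega
      rw [hd, hu, ho, show pvA_o c.toNat = 4 from by simp [pvA_o, h1, h2]]
      cases cs.any pvB_digit <;> cases cs.any pvB_upper <;> cases cs.any pvB_other <;> decide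
    · have hd : pvB_digit c = false := by simp [pvB_digit]; omega
      have hu : pvB_upper c = false := by simp [pvB_upper]; omega
      have ho : pvB_other c = true := by simp [pvB_other]; omega
      rw [hd, hu, ho, show pvA_o c.toNat = 8 from by simp [pvA_o, h1, h2]]
      cases cs.any pvB_digit <;> cases cs.any pvB_upper <;> cases cs.any pvB_other <;> decide

theorem pv_fold_mask (cs : List Char) (l : Nat) :
    cs.foldl (fun l c => l ||| pvA_o c.toNat) l = l ||| pvMask cs := by
  induction cs generalizing l with
  | nil => simp [pvMask]
  | cons c cs ih =>
      rw [List.foldl_cons, ih, Nat.or_assoc, pvA_o_mask]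

theorem pv_popcount (d u o : Bool) :
    pvA_t ((if d then 1 else 0) ||| (if u then 4 else 0) ||| (if o then 8 else 0)) =
      (if d then 1 else 0) + (if u then 1 else 0) + (if o then 1 else 0) := by
  cases d <;> cases u <;> cases o <;> decide

-- ===== VERDICT (by name: the statement is the Claim_ definition above) =====
theorem get_pwd_level_spec : Claim_equal_get_pwd_level := by
  intro password _
  unfold Spec_get_pwd_level get_pwd_level get_pwd_level_alt
  by_cases h : PySem.Str.len password ≤ 5
  · rw [if_pos h, if_pos h]
  · rw [if_neg h, if_neg h, pv_fold_mask, Nat.zero_or]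
    unfold pvMask
    simp only [pv_popcount]
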